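-- pv_equiv track=rewrite | github.com/huangjien/writer-mcp | src/writer_mcp/utils/validators.py | validate_character_ids
-- ===== SOURCE A (Python) =====
-- from typing import Any, Dict, List, Optional
--
-- def validate_character_id(character_id: int) -> bool:
--     """Validate character ID.
--
--     Args:
--         character_id: Character ID to validate
--
--     Returns:
--         True if valid, False otherwise
--     """
--     if not isinstance(character_id, int):
--         return False
--
--     return character_id > 0
--
-- def validate_character_ids(character_ids: List[int]) -> bool:
--     """Validate list of character IDs.
--
--     Args:
--         character_ids: List of character IDs to validate
--
--     Returns:
--         True if valid, False otherwise
--     """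
--     if not isinstance(character_ids, list):
--         return False
--
--     # Check minimum number of IDs
--     if len(character_ids) < 1:
--         return False
--
--     # Check maximum number of IDs
--     if len(character_ids) > 100:
--         return False
--
--     # Validate each ID
--     for character_id in character_ids:
--         if not validate_character_id(character_id):
--             return False
--
--     # Check for duplicates
--     if len(set(character_ids)) != len(character_ids):
--         return False
--
--     return True
-- ===== SOURCE B (Python) =====
-- def validate_character_ids(character_ids):
--     if not isinstance(character_ids, list):
--         return False
--     if not 1 <= len(character_ids) <= 100:
--         return False
--     if any(not isinstance(x, int) for x in character_ids):
--         return False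
--     s = sorted(character_ids)
--     return s[0] > 0 and all(a < b for a, b in zip(s, s[1:]))
-- ===== Notes on version B (the rewrite author's own statement) =====
-- stated objective: alternative
-- what changed: Replaces A's per-element positivity loop and hash-based len(set(...)) duplicate check by sorting the list once and checking that the sorted sequence starts above 0 and is strictly increasing adjacently (min>0 means all positive; a duplicate would be adjacent after sorting).
import Mathlib
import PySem

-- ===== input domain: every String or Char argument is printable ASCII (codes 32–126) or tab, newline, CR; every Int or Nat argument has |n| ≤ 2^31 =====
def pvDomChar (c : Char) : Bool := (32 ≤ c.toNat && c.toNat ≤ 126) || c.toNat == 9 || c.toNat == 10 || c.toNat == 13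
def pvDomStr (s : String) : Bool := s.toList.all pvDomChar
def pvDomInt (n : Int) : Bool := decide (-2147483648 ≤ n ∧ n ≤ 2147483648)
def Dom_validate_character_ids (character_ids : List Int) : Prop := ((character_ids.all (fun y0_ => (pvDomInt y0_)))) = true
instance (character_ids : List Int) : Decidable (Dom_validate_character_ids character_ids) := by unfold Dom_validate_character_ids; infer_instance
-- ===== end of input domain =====

-- B replaces A's per-element positivity loop plus len(set(...)) duplicate check by one sort
-- followed by a check that the sorted list starts above 0 and is strictly increasing (objective: alternative).

-- ===== PORT A =====
def validate_character_id (character_id : Int) : Bool := decide (character_id > 0)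

-- the 'for character_id in character_ids: if not validate_character_id(...): return False' loop
def aLoop : List Int → Bool
  | [] => true
  | x :: rest => if !validate_character_id x then false else aLoop rest

def validate_character_ids (character_ids : List Int) : Bool :=
  if character_ids.length < 1 then false
  else if character_ids.length > 100 then false
  else if !aLoop character_ids then false
  else if (PySem.Set.ofList character_ids).length ≠ character_ids.length then false
  else true

-- ===== PORT B =====
-- 'all(a < b for a, b in zip(s, s[1:]))': adjacent strict-increase scan
def bAsc : List Int → Bool
  | [] => true
  | [_] => true
  | a :: b :: rest => decide (a < b) && bAsc (b :: rest)

def validate_character_ids_alt (character_ids : List Int) : Bool :=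
  if ¬ (1 ≤ character_ids.length ∧ character_ids.length ≤ 100) then false
  else
    -- the 'any(not isinstance(x, int) ...)' guard is vacuous on List Int
    let s := PySem.List.sorted character_ids (fun x => x) false
    -- s[0] is safe: the length guard makes s nonempty, so headD 0 is exactly s[0]
    decide (0 < s.headD 0) && bAsc s

-- ===== PRECONDITION & SPEC =====
def Spec_validate_character_ids (character_ids : List Int) (out : Bool) : Prop := out = validate_character_ids_alt character_ids
instance (character_ids : List Int) (out : Bool) : Decidable (Spec_validate_character_ids character_ids out) := by unfold Spec_validate_character_ids; infer_instance

-- ===== CLAIM (what is proved, stated in full; the proofs are below) =====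
def Claim_equal_validate_character_ids : Prop := ∀ (character_ids : List Int), Dom_validate_character_ids character_ids → Spec_validate_character_ids character_ids (validate_character_ids character_ids)

-- ===== LEMMAS AND PROOFS =====

theorem aLoop_eq_true_iff (xs : List Int) : aLoop xs = true ↔ ∀ x ∈ xs, 0 < x := by
  induction xs with
  | nil => simp [aLoop]
  | cons x rest ih =>
    simp only [aLoop, validate_character_id]
    by_cases h : 0 < x <;> simp [h, ih]

theorem foldl_add_length_le (xs : List Int) (s : PySem.Set Int) :
    (xs.foldl PySem.Set.add s).length ≤ s.length + xs.length := by
  induction xs generalizing s with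
  | nil => simp
  | cons x rest ih =>
    simp only [List.foldl_cons, List.length_cons]
    refine le_trans (ih _) ?_
    by_cases h : x ∈ s
    · simp [PySem.Set.add, h]
    · simp [PySem.Set.add, h]; omega

theorem foldl_add_length_eq_iff (xs : List Int) (s : PySem.Set Int) :
    (xs.foldl PySem.Set.add s).length = s.length + xs.length ↔
      xs.Nodup ∧ ∀ x ∈ xs, x ∉ s := by
  induction xs generalizing s with
  | nil => simp
  | cons x rest ih =>
    simp only [List.foldl_cons, List.length_cons]
    by_cases h : x ∈ s
    · have hadd : PySem.Set.add s x = s := by simp [PySem.Set.add, h]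
      rw [hadd]
      have hle := foldl_add_length_le rest s
      constructor
      · intro heq; omega
      · rintro ⟨-, hall⟩; exact absurd h (hall x (by simp))
    · have hadd : PySem.Set.add s x = s ++ [x] := by simp [PySem.Set.add, h]
      rw [hadd,
        show s.length + (rest.length + 1) = (s ++ [x]).length + rest.length by
          simp; omega,
        ih, List.nodup_cons]
      simp only [List.mem_append, List.mem_cons]
      constructor
      · rintro ⟨hnd, hall⟩
        refine ⟨⟨fun hx => by simpa using hall x hx, hnd⟩, ?_⟩
        rintro y (rfl | hy)
        · exact h
        · intro hys; exact hall y hy (Or.inl hys)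
      · rintro ⟨⟨hxnot, hnd⟩, hall⟩
        refine ⟨hnd, fun y hy => ?_⟩
        rintro (hys | rfl | hnil)
        · exact hall y (Or.inr hy) hys
        · exact hxnot hy
        · cases hnil

theorem ofList_length_eq_iff (xs : List Int) :
    (PySem.Set.ofList xs).length = xs.length ↔ xs.Nodup := by
  rw [PySem.Set.ofList_eq_foldl]
  have := foldl_add_length_eq_iff xs PySem.Set.empty
  simp [PySem.Set.empty] at this
  simpa using this

theorem bAsc_eq_true_iff (xs : List Int) : bAsc xs = true ↔ xs.IsChain (· < ·) := by
  induction xs with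
  | nil => simp [bAsc]
  | cons a rest ih =>
    cases rest with
    | nil => simp [bAsc]
    | cons b t => simp [bAsc, ih, List.isChain_cons_cons]

-- on a (≤)-sorted list, strict adjacent increase ⇔ no duplicates
theorem chain_lt_iff_nodup (s : List Int) (hs : s.Pairwise (· ≤ ·)) :
    s.IsChain (· < ·) ↔ s.Nodup := by
  rw [List.isChain_iff_pairwise]
  constructor
  · intro h; exact h.imp (fun hab => ne_of_lt hab)
  · intro h
    exact (hs.and h).imp (fun ⟨hle, hne⟩ => lt_of_le_of_ne hle hne)

theorem both_char (xs : List Int) : validate_character_ids xs = validate_character_ids_alt xs := by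
  by_cases hlen : 1 ≤ xs.length ∧ xs.length ≤ 100
  · have h1 : ¬ xs.length < 1 := by omega
    have h2 : ¬ xs.length > 100 := by omega
    unfold validate_character_ids validate_character_ids_alt
    rw [if_neg h1, if_neg h2, if_neg (not_not_intro hlen)]
    set s := PySem.List.sorted xs (fun x => x) false with hsdef
    have hperm : s.Perm xs := PySem.List.sorted_perm xs (fun x => x) false
    have hpw : s.Pairwise (· ≤ ·) := by
      simpa using PySem.List.sorted_pairwise xs (fun x => x)
    obtain ⟨m, t, hst⟩ : ∃ m t, s = m :: t := by
      cases hs : s with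
      | nil => exact absurd (hperm.length_eq) (by simp [hs]; omega)
      | cons m t => exact ⟨m, t, rfl⟩
    have hmin : ∀ y ∈ xs, m ≤ y :=
      PySem.List.key_head_sorted_le xs (fun x => x) (hsdef.symm.trans hst)
    have hmem : m ∈ xs := hperm.mem_iff.mp (by simp [hst])
    have hhead : (0 < s.headD 0 ↔ ∀ y ∈ xs, 0 < y) := by
      rw [hst]
      constructor
      · intro h0 y hy; exact lt_of_lt_of_le (by simpa using h0) (hmin y hy)
      · intro hall; simpa using hall m hmem
    rw [Bool.eq_iff_iff]
    simp only [Bool.and_eq_true, decide_eq_true_eq, bAsc_eq_true_iff,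
      chain_lt_iff_nodup s hpw, hperm.nodup_iff, hhead]
    constructor
    · intro h
      by_cases ha : aLoop xs = true
      · rw [if_neg (by simp [ha])] at h
        by_cases hd : (PySem.Set.ofList xs).length = xs.length
        · exact ⟨(aLoop_eq_true_iff xs).mp ha, (ofList_length_eq_iff xs).mp hd⟩
        · rw [if_pos hd] at h; cases h
      · rw [if_pos (by simp [ha])] at h; cases h
    · rintro ⟨hpos, hnd⟩
      rw [if_neg (by simp [(aLoop_eq_true_iff xs).mpr hpos]),
        if_neg (not_not_intro ((ofList_length_eq_iff xs).mpr hnd))]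
  · unfold validate_character_ids validate_character_ids_alt
    rw [if_pos hlen]
    by_cases h1 : xs.length < 1
    · rw [if_pos h1]
    · rw [if_neg h1, if_pos (by omega : xs.length > 100)]

-- ===== VERDICT (by name: the statement is the Claim_ definition above) =====
theorem validate_character_ids_spec : Claim_equal_validate_character_ids := by
  intro xs _
  unfold Spec_validate_character_ids
  exact both_char xs
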